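-- pv_equiv track=rewrite | github.com/Raptor56MTG/Jane-Street-Puzzles-2024 | 2024-mar/adjacent.py | adjacent_four
-- ===== SOURCE A (Python) =====
-- def adjacent_four(value: int) -> list[tuple[int]]:
--     """This function takes a number and outputs a list of possible
--     values of four different numbers 1 - 9 that can sum up to it. The sum
--     must be of the form x + x + y + z = value"""
--
--     valid_sums = []
--
--     doubles = [2, 3, 4, 5, 6, 7, 8, 9]
--     singles = [1, 2, 3, 4, 5, 6, 7, 8, 9]
--
--     for i in doubles:
--         # remove our double value from the singles list
--         updated_singles = singles.copy()
--         updated_singles.remove(i)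
--         for index, j in enumerate(updated_singles):
--             # move up by 1 to prevent duplicate and reference index
--             for k_index in range(index + 1, len(updated_singles)):
--                 if 2 * i + j + updated_singles[k_index] == value:
--                     valid_sums.append([i, i, j, updated_singles[k_index]])
--
--     return valid_sums
-- ===== SOURCE B (Python) =====
-- def adjacent_four(value: int) -> list[tuple[int]]:
--     """Same result as A: for each doubled digit i and smaller single j,
--     compute the required fourth digit directly as k = value - 2*i - j
--     instead of scanning an inner loop over candidates."""
--     valid_sums = []
--     for i in range(2, 10):
--         for j in range(1, 10):
--             if j == i:
--                 continue
--             k = value - 2 * i - j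
--             if j < k <= 9 and k != i:
--                 valid_sums.append([i, i, j, k])
--     return valid_sums
-- ===== Notes on version B (the rewrite author's own statement) =====
-- stated objective: simpler
-- what changed: Replaces A's inner scan over later singles with a closed-form complement k = value - 2*i - j checked against j < k <= 9 and k != i, removing one loop level.
import Mathlib
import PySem

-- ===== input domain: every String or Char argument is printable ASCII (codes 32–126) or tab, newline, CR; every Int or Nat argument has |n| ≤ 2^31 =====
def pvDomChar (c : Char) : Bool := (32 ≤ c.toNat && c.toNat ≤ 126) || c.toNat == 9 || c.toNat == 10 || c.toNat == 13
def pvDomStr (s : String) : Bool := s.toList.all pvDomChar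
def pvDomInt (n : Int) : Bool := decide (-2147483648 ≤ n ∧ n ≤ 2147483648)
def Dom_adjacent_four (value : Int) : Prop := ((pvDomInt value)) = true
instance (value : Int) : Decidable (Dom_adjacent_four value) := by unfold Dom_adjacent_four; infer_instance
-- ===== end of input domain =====

-- B replaces A's inner scan over later singles by the closed-form fourth digit
-- k = value - 2*i - j, removing one loop level (objective: simpler).

-- ===== PORT A =====
def adjacent_four (value : Int) : List (List Int) :=
  let doubles : List Int := [2, 3, 4, 5, 6, 7, 8, 9]
  let singles : List Int := [1, 2, 3, 4, 5, 6, 7, 8, 9]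
  doubles.foldl (fun valid_sums i =>
    -- updated_singles = singles.copy(); updated_singles.remove(i)  (i is always present)
    let updated_singles := (PySem.List.remove? singles i).getD []
    (PySem.List.enumerate updated_singles).foldl (fun vs p =>
      let index := p.1
      let j := p.2
      (PySem.List.pyRange (index + 1) (updated_singles.length : Int) 1).foldl (fun vs2 k_index =>
        if 2 * i + j + PySem.List.pyGetD updated_singles k_index 0 = value then
          vs2 ++ [[i, i, j, PySem.List.pyGetD updated_singles k_index 0]]
        else vs2) vs) valid_sums) []

-- ===== PORT B =====
def adjacent_four_alt (value : Int) : List (List Int) :=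
  (PySem.List.pyRange 2 10 1).foldl (fun vs i =>
    (PySem.List.pyRange 1 10 1).foldl (fun vs j =>
      if j = i then vs
      else
        let k := value - 2 * i - j
        if j < k ∧ k ≤ 9 ∧ k ≠ i then vs ++ [[i, i, j, k]] else vs) vs) []

-- ===== PRECONDITION & SPEC =====
def Spec_adjacent_four (value : Int) (out : List (List Int)) : Prop := out = adjacent_four_alt value
instance (value : Int) (out : List (List Int)) : Decidable (Spec_adjacent_four value out) := by unfold Spec_adjacent_four; infer_instance

-- ===== CLAIM (what is proved, stated in full; the proofs are below) =====
def Claim_equal_adjacent_four : Prop := ∀ (value : Int), Dom_adjacent_four value → Spec_adjacent_four value (adjacent_four value)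

-- ===== LEMMAS AND PROOFS =====

-- a fold whose step leaves the accumulator unchanged on every list element is the identity
theorem pv_foldl_acc_id {α β : Type} (l : List β) (g : List α → β → List α)
    (h : ∀ a x, x ∈ l → g a x = a) : ∀ acc, l.foldl g acc = acc := by
  induction l with
  | nil => intro acc; rfl
  | cons x xs ih =>
    intro acc
    rw [List.foldl_cons, h acc x (List.mem_cons_self), ih]
    intro a y hy; exact h a y (List.mem_cons_of_mem _ hy)

theorem pv_pyGetD_default_or_mem (xs : List Int) (i : Int) (d : Int) :
    PySem.List.pyGetD xs i d = d ∨ PySem.List.pyGetD xs i d ∈ xs := by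
  unfold PySem.List.pyGetD
  cases h : PySem.List.pyGet? xs i with
  | none => left; rfl
  | some a =>
    right
    simp only [Option.getD_some]
    simp only [PySem.List.pyGet?, PySem.List.pyIdx?] at h
    split at h <;> split at h <;>
      first
        | exact List.mem_of_getElem? h
        | exact List.mem_of_getElem? (by simpa using h)
        | simp at h

theorem pv_A_empty (value : Int) (h : value < 0 ∨ 40 < value) : adjacent_four value = [] := by
  unfold adjacent_four
  apply pv_foldl_acc_id
  intro a i hi
  have hi' : 2 ≤ i ∧ i ≤ 9 := by
    simp only [List.mem_cons, List.not_mem_nil, or_false] at hi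
    rcases hi with h'|h'|h'|h'|h'|h'|h'|h' <;> omega
  have hising : i ∈ ([1, 2, 3, 4, 5, 6, 7, 8, 9] : List Int) := by
    simp only [List.mem_cons, List.not_mem_nil, or_false]
    omega
  apply pv_foldl_acc_id
  intro a2 p hp
  have hu : (PySem.List.remove? ([1, 2, 3, 4, 5, 6, 7, 8, 9] : List Int) i).getD [] =
      ([1, 2, 3, 4, 5, 6, 7, 8, 9] : List Int).erase i := by
    rw [PySem.List.remove?_eq_some_erase _ _ hising]; rfl
  rw [hu] at hp ⊢
  have hj : p.2 ∈ ([1, 2, 3, 4, 5, 6, 7, 8, 9] : List Int) := by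
    have : p.2 ∈ ([1, 2, 3, 4, 5, 6, 7, 8, 9] : List Int).erase i := by
      rcases (PySem.List.mem_enumerate_iff _ _ _).mp hp with ⟨k, hk, hpk⟩
      rw [hpk]; exact List.getElem_mem hk
    exact List.mem_of_mem_erase this
  have hj' : 1 ≤ p.2 ∧ p.2 ≤ 9 := by
    simp only [List.mem_cons, List.not_mem_nil, or_false] at hj
    rcases hj with h'|h'|h'|h'|h'|h'|h'|h'|h' <;> omega
  apply pv_foldl_acc_id
  intro a3 ki _
  rw [if_neg]
  have he := pv_pyGetD_default_or_mem (([1, 2, 3, 4, 5, 6, 7, 8, 9] : List Int).erase i) ki 0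
  have he' : 0 ≤ PySem.List.pyGetD (([1, 2, 3, 4, 5, 6, 7, 8, 9] : List Int).erase i) ki 0 ∧
      PySem.List.pyGetD (([1, 2, 3, 4, 5, 6, 7, 8, 9] : List Int).erase i) ki 0 ≤ 9 := by
    rcases he with he | he
    · omega
    · have := List.mem_of_mem_erase he
      simp only [List.mem_cons, List.not_mem_nil, or_false] at this
      rcases this with h'|h'|h'|h'|h'|h'|h'|h'|h' <;> omega
  omega

theorem pv_B_empty (value : Int) (h : value < 0 ∨ 40 < value) : adjacent_four_alt value = [] := by
  unfold adjacent_four_alt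
  apply pv_foldl_acc_id
  intro a i hi
  rw [PySem.List.mem_pyRange_one] at hi
  apply pv_foldl_acc_id
  intro a2 j hj
  rw [PySem.List.mem_pyRange_one] at hj
  by_cases hji : j = i
  · rw [if_pos hji]
  · rw [if_neg hji, if_neg]
    intro ⟨h1, h2, _⟩
    omega

-- ===== VERDICT (by name: the statement is the Claim_ definition above) =====
set_option maxRecDepth 4000 in
theorem adjacent_four_spec : Claim_equal_adjacent_four := by
  intro value _
  unfold Spec_adjacent_four
  by_cases hb : 0 ≤ value ∧ value ≤ 40
  · obtain ⟨h1, h2⟩ := hb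
    interval_cases value <;> decide
  · have h : value < 0 ∨ 40 < value := by omega
    rw [pv_A_empty value h, pv_B_empty value h]
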